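-- pv_equiv track=rewrite | github.com/Dodo327/PPPD | lab_5/lab5_2019_A.py | najmniejszy_plot
-- ===== SOURCE A (Python) =====
-- def drzewo(x, y):
--     if x >= 0 and x <= 10 and y >= 0 and y <= 10:
--         return (x == y) and (x % 10 < 4 or x % 10 > 5)
--     elif x >= -10 and x <= -1 and y >= 0 and y <= 10:
--         return True
--     else:
--         return False
--
-- def najmniejszy_plot(x_min, x_max, y_min, y_max):
--     najmniejszy_x = None
--     najwiekszy_x = None
--     najmniejszy_y = None
--     najwiekszy_y = None
--     if x_min >= x_max or y_min >= y_max: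
--         return 0, 0, 0, 0
--
--     jest_drzewo = False
--     for i in range(x_min, x_max + 1):
--         for j in range(y_min, y_max + 1):
--             if drzewo(i, j):
--                 jest_drzewo = True
--                 if najmniejszy_x == None or najmniejszy_x > i:
--                     najmniejszy_x = i
--                 if najmniejszy_y == None or najmniejszy_y > j:
--                     najmniejszy_y = j
--                 if najwiekszy_x == None or najwiekszy_x < i:
--                     najwiekszy_x = i
--                 if najwiekszy_y == None or najwiekszy_y < j:
--                     najwiekszy_y = j
--
--     if not jest_drzewo:
--         return 0, 0, 0, 0
--     return najmniejszy_x, najwiekszy_x, najmniejszy_y, najwiekszy_y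
-- ===== SOURCE B (Python) =====
-- # Constant tree-cell set: intersect with the query rectangle, take min/max of the survivors.
-- _TREES = [(x, y) for x in range(-10, 0) for y in range(11)] + \
--          [(d, d) for d in (0, 1, 2, 3, 6, 7, 8, 9, 10)]
--
-- def najmniejszy_plot(x_min, x_max, y_min, y_max):
--     if x_min >= x_max or y_min >= y_max:
--         return 0, 0, 0, 0
--     cells = [c for c in _TREES
--              if x_min <= c[0] <= x_max and y_min <= c[1] <= y_max]
--     if not cells:
--         return 0, 0, 0, 0
--     xs = [c[0] for c in cells]
--     ys = [c[1] for c in cells]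
--     return min(xs), max(xs), min(ys), max(ys)
-- ===== Notes on version B (the rewrite author's own statement) =====
-- stated objective: alternative
-- what changed: Instead of scanning every cell of the query rectangle and testing drzewo on each, B enumerates the fixed constant set of 119 tree cells once, filters it by the query bounds and takes min/max of the survivors.
import Mathlib
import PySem

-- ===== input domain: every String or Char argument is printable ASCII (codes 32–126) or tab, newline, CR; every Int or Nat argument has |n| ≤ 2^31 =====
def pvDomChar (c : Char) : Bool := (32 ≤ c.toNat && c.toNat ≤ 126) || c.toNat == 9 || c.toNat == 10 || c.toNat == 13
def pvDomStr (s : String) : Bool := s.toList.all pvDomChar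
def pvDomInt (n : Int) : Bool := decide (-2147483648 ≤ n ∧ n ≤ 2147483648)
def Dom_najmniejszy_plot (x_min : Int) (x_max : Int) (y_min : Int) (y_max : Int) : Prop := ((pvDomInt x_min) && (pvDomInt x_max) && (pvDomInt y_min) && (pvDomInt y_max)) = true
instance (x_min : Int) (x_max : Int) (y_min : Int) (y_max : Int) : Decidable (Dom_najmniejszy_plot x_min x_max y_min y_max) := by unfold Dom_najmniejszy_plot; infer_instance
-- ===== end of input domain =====

-- B replaces A's cell-by-cell scan of the whole query rectangle by intersecting the fixed
-- constant set of tree cells with the query bounds and taking min/max of the survivors.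

-- ===== PORT A =====
def drzewo (x : Int) (y : Int) : Bool :=
  if x ≥ 0 ∧ x ≤ 10 ∧ y ≥ 0 ∧ y ≤ 10 then
    (x == y) && (decide (PySem.Int.mod x 10 < 4) || decide (PySem.Int.mod x 10 > 5))
  else if x ≥ -10 ∧ x ≤ -1 ∧ y ≥ 0 ∧ y ≤ 10 then true
  else false

-- the four 'if najmniejszy_x == None or najmniejszy_x > i: najmniejszy_x = i' updates of A's body
def pvUpMin (o : Option Int) (v : Int) : Option Int :=
  match o with | none => some v | some m => if m > v then some v else some m
def pvUpMax (o : Option Int) (v : Int) : Option Int :=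
  match o with | none => some v | some m => if m < v then some v else some m
-- one iteration of A's inner loop body (state = najmniejszy_x, najwiekszy_x, najmniejszy_y, najwiekszy_y, jest_drzewo)
def pvU (s : Option Int × Option Int × Option Int × Option Int × Bool) (c : Int × Int) :
    Option Int × Option Int × Option Int × Option Int × Bool :=
  (pvUpMin s.1 c.1, pvUpMax s.2.1 c.1, pvUpMin s.2.2.1 c.2, pvUpMax s.2.2.2.1 c.2, true)

def najmniejszy_plot (x_min : Int) (x_max : Int) (y_min : Int) (y_max : Int) : List Int :=
  if x_min ≥ x_max ∨ y_min ≥ y_max then [0, 0, 0, 0]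
  else
    let st := (PySem.List.pyRange x_min (x_max + 1) 1).foldl
      (fun s i => (PySem.List.pyRange y_min (y_max + 1) 1).foldl
        (fun s j => if drzewo i j then pvU s (i, j) else s) s)
      (none, none, none, none, false)
    if st.2.2.2.2 = false then [0, 0, 0, 0]
    -- when jest_drzewo is true all four options are set; A returns their (int) contents
    else [st.1.getD 0, st.2.1.getD 0, st.2.2.1.getD 0, st.2.2.2.1.getD 0]

-- ===== PORT B =====
-- the constant list _TREES of Source B
def pvTrees : List (Int × Int) :=
  ((PySem.List.pyRange (-10) 0 1).flatMap (fun x => (PySem.List.pyRange 0 11 1).map (fun y => (x, y))))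
  ++ (([0, 1, 2, 3, 6, 7, 8, 9, 10] : List Int).map (fun d => (d, d)))

def najmniejszy_plot_alt (x_min : Int) (x_max : Int) (y_min : Int) (y_max : Int) : List Int :=
  if x_min ≥ x_max ∨ y_min ≥ y_max then [0, 0, 0, 0]
  else
    let cells := pvTrees.filter
      (fun c => decide (x_min ≤ c.1) && decide (c.1 ≤ x_max) && decide (y_min ≤ c.2) && decide (c.2 ≤ y_max))
    if cells.isEmpty then [0, 0, 0, 0]
    else
      let xs := cells.map Prod.fst
      let ys := cells.map Prod.snd
      [(PySem.List.min? xs (fun v => v)).getD 0, (PySem.List.max? xs (fun v => v)).getD 0,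
       (PySem.List.min? ys (fun v => v)).getD 0, (PySem.List.max? ys (fun v => v)).getD 0]

-- ===== PRECONDITION & SPEC =====
def Spec_najmniejszy_plot (x_min : Int) (x_max : Int) (y_min : Int) (y_max : Int) (out : List Int) : Prop := out = najmniejszy_plot_alt x_min x_max y_min y_max
instance (x_min : Int) (x_max : Int) (y_min : Int) (y_max : Int) (out : List Int) : Decidable (Spec_najmniejszy_plot x_min x_max y_min y_max out) := by unfold Spec_najmniejszy_plot; infer_instance

-- ===== CLAIM (what is proved, stated in full; the proofs are below) =====
def Claim_equal_najmniejszy_plot : Prop := ∀ (x_min : Int) (x_max : Int) (y_min : Int) (y_max : Int), Dom_najmniejszy_plot x_min x_max y_min y_max → Spec_najmniejszy_plot x_min x_max y_min y_max (najmniejszy_plot x_min x_max y_min y_max)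

-- ===== LEMMAS AND PROOFS =====

-- A's nested loops are a fold over the cartesian product of the two ranges
theorem pv_foldl_cross {σ : Type} (xs ys : List Int) (F : σ → Int × Int → σ) (s0 : σ) :
    xs.foldl (fun s i => ys.foldl (fun s j => F s (i, j)) s) s0 = (xs ×ˢ ys).foldl F s0 := by
  induction xs generalizing s0 with
  | nil => simp [List.nil_product]
  | cons a t ih => simp [List.product_cons, List.foldl_append, List.foldl_map, ih]

-- drzewo x y holds exactly on the constant list pvTrees
theorem pv_drzewo_iff (x y : Int) : drzewo x y = true ↔ (x, y) ∈ pvTrees := by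
  constructor
  · intro h
    unfold drzewo at h
    split_ifs at h with h1 h2
    · obtain ⟨hx0, hx10, hy0, hy10⟩ := h1
      interval_cases x <;> interval_cases y <;> revert h <;> decide
    · obtain ⟨hx0, hx10, hy0, hy10⟩ := h2
      simp only [pvTrees, List.mem_append, List.mem_flatMap, List.mem_map,
        PySem.List.mem_pyRange_one]
      exact Or.inl ⟨x, ⟨by omega, by omega⟩, y, ⟨by omega, by omega⟩, rfl⟩
  · intro h
    simp only [pvTrees, List.mem_append, List.mem_flatMap, List.mem_map,
      PySem.List.mem_pyRange_one] at h
    rcases h with ⟨a, ⟨ha1, ha2⟩, b, ⟨hb1, hb2⟩, hab⟩ | ⟨d, hd, hxy⟩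
    · cases hab
      unfold drzewo
      split_ifs with h1 h2
      · omega
      · rfl
      · exact absurd ⟨by omega, by omega, by omega, by omega⟩ h2
    · cases hxy
      simp only [List.mem_cons, List.not_mem_nil, or_false] at hd
      rcases hd with rfl | rfl | rfl | rfl | rfl | rfl | rfl | rfl | rfl <;> decide

-- folding pvUpMin from some m is the running minimum
theorem pv_foldUpMin_some (zs : List Int) (m : Int) :
    zs.foldl pvUpMin (some m) = some (zs.foldl min m) := by
  induction zs generalizing m with
  | nil => rfl
  | cons z t ih =>
    simp only [List.foldl_cons, pvUpMin]
    rw [show (if m > z then some z else some m) = some (min m z) by split_ifs <;> simp <;> omega]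
    exact ih (min m z)

theorem pv_foldUpMax_some (zs : List Int) (m : Int) :
    zs.foldl pvUpMax (some m) = some (zs.foldl max m) := by
  induction zs generalizing m with
  | nil => rfl
  | cons z t ih =>
    simp only [List.foldl_cons, pvUpMax]
    rw [show (if m < z then some z else some m) = some (max m z) by split_ifs <;> simp <;> omega]
    exact ih (max m z)

-- folding pvUpMin from none computes Python's min()
theorem pv_foldUpMin_none (zs : List Int) :
    zs.foldl pvUpMin none = PySem.List.min? zs (fun v => v) := by
  cases zs with
  | nil => rfl
  | cons z t =>
    simp only [List.foldl_cons, pvUpMin, PySem.List.min?_id_cons]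
    exact pv_foldUpMin_some t z

theorem pv_foldUpMax_none (zs : List Int) :
    zs.foldl pvUpMax none = PySem.List.max? zs (fun v => v) := by
  cases zs with
  | nil => rfl
  | cons z t =>
    simp only [List.foldl_cons, pvUpMax, PySem.List.max?_id_cons]
    exact pv_foldUpMax_some t z

-- the pvU-fold splits into four independent component folds plus the flag
theorem pv_foldU (L : List (Int × Int)) (a b c d : Option Int) (e : Bool) :
    L.foldl pvU (a, b, c, d, e) =
      ((L.map Prod.fst).foldl pvUpMin a, (L.map Prod.fst).foldl pvUpMax b,
       (L.map Prod.snd).foldl pvUpMin c, (L.map Prod.snd).foldl pvUpMax d,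
       e || !L.isEmpty) := by
  induction L generalizing a b c d e with
  | nil => simp
  | cons h t ih => simp [pvU, ih]

-- min? depends only on membership
theorem pv_min?_congr (zs ws : List Int) (h : ∀ v, v ∈ zs ↔ v ∈ ws) :
    PySem.List.min? zs (fun v => v) = PySem.List.min? ws (fun v => v) := by
  cases hz : PySem.List.min? zs (fun v => v) with
  | none =>
    rw [PySem.List.min?_eq_none_iff] at hz
    subst hz
    have : ws = [] := List.eq_nil_iff_forall_not_mem.2 (fun v hv => by simp [← h v] at hv)
    simp [this]
    rfl
  | some m =>
    cases hw : PySem.List.min? ws (fun v => v) with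
    | none =>
      rw [PySem.List.min?_eq_none_iff] at hw
      exact absurd ((h m).1 (PySem.List.min?_mem hz)) (by simp [hw])
    | some n =>
      have h1 : m ≤ n := PySem.List.min?_isMin hz n ((h n).2 (PySem.List.min?_mem hw))
      have h2 : n ≤ m := PySem.List.min?_isMin hw m ((h m).1 (PySem.List.min?_mem hz))
      exact congrArg some (le_antisymm h1 h2)

theorem pv_max?_congr (zs ws : List Int) (h : ∀ v, v ∈ zs ↔ v ∈ ws) :
    PySem.List.max? zs (fun v => v) = PySem.List.max? ws (fun v => v) := by
  cases hz : PySem.List.max? zs (fun v => v) with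
  | none =>
    rw [PySem.List.max?_eq_none_iff] at hz
    subst hz
    have : ws = [] := List.eq_nil_iff_forall_not_mem.2 (fun v hv => by simp [← h v] at hv)
    simp [this]
    rfl
  | some m =>
    cases hw : PySem.List.max? ws (fun v => v) with
    | none =>
      rw [PySem.List.max?_eq_none_iff] at hw
      exact absurd ((h m).1 (PySem.List.max?_mem hz)) (by simp [hw])
    | some n =>
      have h1 : n ≤ m := PySem.List.max?_isMax hz n ((h n).2 (PySem.List.max?_mem hw))
      have h2 : m ≤ n := PySem.List.max?_isMax hw m ((h m).1 (PySem.List.max?_mem hz))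
      exact congrArg some (le_antisymm h2 h1)

-- ===== VERDICT (by name: the statement is the Claim_ definition above) =====
theorem najmniejszy_plot_spec : Claim_equal_najmniejszy_plot := by
  intro x_min x_max y_min y_max _
  unfold Spec_najmniejszy_plot najmniejszy_plot najmniejszy_plot_alt
  by_cases hg : x_min ≥ x_max ∨ y_min ≥ y_max
  · simp [hg]
  · simp only [hg, if_false]
    set LA : List (Int × Int) :=
      ((PySem.List.pyRange x_min (x_max + 1) 1) ×ˢ (PySem.List.pyRange y_min (y_max + 1) 1)).filter
        (fun c => drzewo c.1 c.2) with hLA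
    set LB : List (Int × Int) := pvTrees.filter
      (fun c => decide (x_min ≤ c.1) && decide (c.1 ≤ x_max) && decide (y_min ≤ c.2) && decide (c.2 ≤ y_max)) with hLB
    have hmem : ∀ c : Int × Int, c ∈ LA ↔ c ∈ LB := by
      intro c
      simp only [hLA, hLB, List.mem_filter, ← pv_drzewo_iff c.1 c.2]
      constructor
      · rintro ⟨hc, hd⟩
        obtain ⟨h1, h2⟩ := List.pair_mem_product.1 hc
        rw [PySem.List.mem_pyRange_one] at h1 h2
        exact ⟨hd, by simp; omega⟩
      · rintro ⟨hd, hb⟩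
        simp only [Bool.and_eq_true, decide_eq_true_eq] at hb
        refine ⟨List.pair_mem_product.2 ⟨?_, ?_⟩, hd⟩ <;> rw [PySem.List.mem_pyRange_one] <;> omega
    have hfold :
        (PySem.List.pyRange x_min (x_max + 1) 1).foldl
          (fun s i => (PySem.List.pyRange y_min (y_max + 1) 1).foldl
            (fun s j => if drzewo i j then pvU s (i, j) else s) s)
          ((none : Option Int), (none : Option Int), (none : Option Int), (none : Option Int), false)
        = LA.foldl pvU (none, none, none, none, false) := by
      rw [pv_foldl_cross _ _ (fun s c => if drzewo c.1 c.2 then pvU s c else s)]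
      exact PySem.List.foldl_if_eq_foldl_filter (fun c => drzewo c.1 c.2) pvU _ _
    simp only [hfold, pv_foldU, Bool.false_or]
    have hmemf : ∀ v, v ∈ LA.map Prod.fst ↔ v ∈ LB.map Prod.fst := by
      intro v; simp only [List.mem_map]; exact exists_congr (fun c => and_congr_left' (hmem c))
    have hmems : ∀ v, v ∈ LA.map Prod.snd ↔ v ∈ LB.map Prod.snd := by
      intro v; simp only [List.mem_map]; exact exists_congr (fun c => and_congr_left' (hmem c))
    by_cases hA : LA.isEmpty
    · have hAnil : LA = [] := List.isEmpty_iff.1 hA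
      have hBnil : LB = [] := List.eq_nil_iff_forall_not_mem.2
        (fun c hc => by simp [hAnil, ← hmem c] at hc)
      simp [hAnil, hBnil]
    · have hBne : ¬ LB.isEmpty := by
        intro hB
        rcases List.exists_mem_of_ne_nil LA (by simpa [List.isEmpty_iff] using hA) with ⟨c, hc⟩
        rw [hmem c] at hc
        simp [List.isEmpty_iff.1 hB] at hc
      simp only [hA, hBne, Bool.not_false]
      rw [pv_foldUpMin_none, pv_foldUpMax_none, pv_foldUpMin_none, pv_foldUpMax_none,
        pv_min?_congr _ _ hmemf, pv_max?_congr _ _ hmemf,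
        pv_min?_congr _ _ hmems, pv_max?_congr _ _ hmems]
      simp
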